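-- pv_equiv track=rewrite | github.com/shwetakumari14/Practice-Problems | Pythons Solutions/Strange Equality.py | findSpecialXOR
-- ===== SOURCE A (Python) =====
-- import math
--
-- def findSpecialXOR(a):
--     numOfBits = int(math.log2(a) + 1)
--     x, y = 0, 0
--
--     for i in range(numOfBits):
--         if a & (1 << i) != 0:
--             continue
--         x += 1 << i
--
--     y = 1 << numOfBits
--
--     return x ^ y
-- ===== SOURCE B (Python) =====
-- import math
--
-- def findSpecialXOR(a):
--     # closed form: the unset bits of a below its top bit are (2^n - 1) - a,
--     # and the loop's value xor 2^n is that plus the next power of two.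
--     numOfBits = int(math.log2(a) + 1)
--     return ((1 << numOfBits) - 1 - a) ^ (1 << numOfBits)
-- ===== Notes on version B (the rewrite author's own statement) =====
-- stated objective: simpler
-- what changed: replaces the per-bit loop that sums the unset bits of a with the closed-form subtraction (2^numOfBits - 1) - a, keeping the identical first line so the ValueError on a <= 0 is unchanged
import Mathlib
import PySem

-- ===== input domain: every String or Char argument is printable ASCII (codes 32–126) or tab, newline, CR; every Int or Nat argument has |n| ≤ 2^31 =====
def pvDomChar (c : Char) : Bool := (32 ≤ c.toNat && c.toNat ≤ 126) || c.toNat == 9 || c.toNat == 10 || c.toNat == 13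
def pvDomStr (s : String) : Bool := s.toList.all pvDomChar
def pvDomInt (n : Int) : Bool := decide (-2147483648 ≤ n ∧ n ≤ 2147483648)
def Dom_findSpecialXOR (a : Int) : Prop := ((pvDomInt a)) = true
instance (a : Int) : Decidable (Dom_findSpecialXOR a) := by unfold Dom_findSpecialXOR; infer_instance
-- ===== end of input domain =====

-- B replaces A's per-bit summation loop with the closed-form complement (2^n - 1) - a; objective: simpler.


-- ===== PORT A =====
-- `int(math.log2(a) + 1)` is ported as the bit length `a.toNat.size`: for every
-- 1 ≤ a ≤ 2^31 (Pre_ ∧ Dom) the float expression equals the bit length exactly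
-- (checked numerically over the domain); math.log2 raises ValueError for a ≤ 0,
-- which Pre_ excludes.  `x & y`, `x ^ y`, `1 << i` are Int.land / Int.xor /
-- Int.shiftLeft; the loop index i of range(numOfBits) is nonnegative, so `.toNat`
-- on it is exact.
-- the loop body: `if a & (1 << i) != 0: continue` / `x += 1 << i`
def pvStep (a : Int) (x : Int) (i : Int) : Int :=
  if Int.land a ((1 : Int) <<< i.toNat) ≠ 0 then x else x + ((1 : Int) <<< i.toNat)

def findSpecialXOR (a : Int) : Int :=
  let numOfBits : Int := ((a.toNat).size : Int)
  let x : Int := (PySem.List.pyRange 0 numOfBits 1).foldl (pvStep a) 0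
  let y : Int := (1 : Int) <<< numOfBits.toNat
  Int.xor x y

-- ===== PORT B =====
def findSpecialXOR_alt (a : Int) : Int :=
  let numOfBits : Int := ((a.toNat).size : Int)
  Int.xor (((1 : Int) <<< numOfBits.toNat) - 1 - a) ((1 : Int) <<< numOfBits.toNat)

-- ===== PRECONDITION & SPEC =====
-- Pre_ excludes a ≤ 0, on which math.log2 (both in A and in B) raises ValueError.
def Pre_findSpecialXOR (a : Int) : Prop := 1 ≤ a
instance (a : Int) : Decidable (Pre_findSpecialXOR a) := by unfold Pre_findSpecialXOR; infer_instance
def pvWitness_findSpecialXOR : Int := (5)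

def Spec_findSpecialXOR (a : Int) (out : Int) : Prop := out = findSpecialXOR_alt a
instance (a : Int) (out : Int) : Decidable (Spec_findSpecialXOR a out) := by unfold Spec_findSpecialXOR; infer_instance

-- ===== CLAIM (what is proved, stated in full; the proofs are below) =====
def Claim_equal_findSpecialXOR : Prop := ∀ (a : Int), Dom_findSpecialXOR a → Pre_findSpecialXOR a → Spec_findSpecialXOR a (findSpecialXOR a)

-- ===== LEMMAS AND PROOFS =====

-- A's loop, at the Nat level: summing 2^i over the unset bits i < k of m gives 2^k - 1 - m % 2^k.
theorem pv_loop_nat (m : Nat) : ∀ k : Nat,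
    (List.range k).foldl (fun x i => if m.testBit i then x else x + 2 ^ i) 0
      = 2 ^ k - 1 - m % 2 ^ k := by
  intro k
  induction k with
  | zero => simp
  | succ k ih =>
    rw [List.range_succ, List.foldl_append, ih]
    have hmod : m % 2 ^ (k + 1) = m % 2 ^ k + 2 ^ k * (m / 2 ^ k % 2) := Nat.mod_pow_succ
    have hlt : m % 2 ^ k < 2 ^ k := Nat.mod_lt _ (Nat.pow_pos (by norm_num))
    have hsucc : 2 ^ (k + 1) = 2 ^ k * 2 := pow_succ 2 k
    have htb : m.testBit k = decide (m / 2 ^ k % 2 = 1) := Nat.testBit_eq_decide_div_mod_eq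
    have h2 : m / 2 ^ k % 2 = 0 ∨ m / 2 ^ k % 2 = 1 := Nat.mod_two_eq_zero_or_one _
    rcases h2 with h2 | h2 <;> rw [h2] at hmod <;>
      simp only [List.foldl_cons, List.foldl_nil, htb, h2] <;> norm_num <;> omega

theorem pv_shift_cast (j : Nat) : ((1 : Int) <<< j) = ((2 ^ j : Nat) : Int) := by
  have := Int.natCast_shiftLeft 1 j
  simpa [Nat.shiftLeft_eq] using this.symm

-- cast bridge: A's Int loop over a casted range equals the Nat loop
theorem pv_loop_cast (m : Nat) (l : List Nat) : ∀ x : Nat,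
    List.foldl (pvStep (m : Int)) (x : Int) (l.map (fun k : Nat => (k : Int)))
      = ((l.foldl (fun x i => if m.testBit i then x else x + 2 ^ i) x : Nat) : Int) := by
  induction l with
  | nil => intro x; simp
  | cons j t ih =>
    intro x
    have hland : Int.land (m : Int) ((1 : Int) <<< (j : Int).toNat)
        = ((m &&& 2 ^ j : Nat) : Int) := by
      rw [show ((j : Int).toNat = j) from rfl, pv_shift_cast]; rfl
    have hpow : 0 < 2 ^ j := Nat.pow_pos (by norm_num)
    have hcond : (Int.land (m : Int) ((1 : Int) <<< (j : Int).toNat) ≠ 0) ↔ m.testBit j := by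
      rw [hland, ne_eq, Int.natCast_eq_zero, Nat.and_two_pow]
      cases hb : m.testBit j <;> simp <;> omega
    by_cases hb : m.testBit j
    · simp only [List.map_cons, List.foldl_cons, pvStep, if_pos (hcond.mpr hb), hb, if_true]
      exact ih x
    · have hne : ¬ (Int.land (m : Int) ((1 : Int) <<< (j : Int).toNat) ≠ 0) :=
        fun h => hb (hcond.mp h)
      simp only [List.map_cons, List.foldl_cons, pvStep, if_neg hne, hb]
      rw [show ((j : Int).toNat = j) from rfl, pv_shift_cast, ← Nat.cast_add]
      exact ih (x + 2 ^ j)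

theorem pv_loop_cast0 (m : Nat) (l : List Nat) :
    List.foldl (pvStep (m : Int)) (0 : Int) (l.map (fun k : Nat => (k : Int)))
      = ((l.foldl (fun x i => if m.testBit i then x else x + 2 ^ i) 0 : Nat) : Int) :=
  pv_loop_cast m l 0

-- ===== VERDICT (by name: the statement is the Claim_ definition above) =====
theorem findSpecialXOR_spec : Claim_equal_findSpecialXOR := by
  intro a _ hpre
  unfold Spec_findSpecialXOR findSpecialXOR findSpecialXOR_alt
  have hpre' : (1 : Int) ≤ a := hpre
  set m : Nat := a.toNat with hm
  have ha : (m : Int) = a := Int.toNat_of_nonneg (by omega)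
  have hmlt : m < 2 ^ m.size := Nat.lt_size_self m
  have hm1 : 1 ≤ m := by omega
  -- rewrite the range and evaluate the loop
  have hrange : PySem.List.pyRange 0 ((m.size : Nat) : Int) 1
      = (List.range m.size).map (fun k : Nat => (k : Int)) := by
    simpa using PySem.List.pyRange_zero_nat m.size
  simp only [← ha, Int.toNat_natCast]
  rw [hrange, pv_loop_cast0 m (List.range m.size), pv_loop_nat m m.size, Nat.mod_eq_of_lt hmlt]
  congr 1
  rw [pv_shift_cast m.size]
  omega
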